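-- pv_equiv track=rewrite | github.com/AlexeyNilov/pushup | service/fitness_test.py | get_army_pushup_range
-- ===== SOURCE A (Python) =====
-- from typing import List, Tuple, Dict, Any
--
-- AGE_GROUPS_ARMY = [
--     (17, 22, "17-22"),
--     (23, 26, "22-26"),
--     (27, 31, "27-31"),
--     (32, 36, "32-36"),
--     (37, 41, "37-41"),
--     (42, 46, "42-46"),
--     (47, 51, "47-51"),
--     (52, 56, "52-56"),
--     (57, 61, "57-61"),
--     (62, float("inf"), "62+"),
-- ]
--
-- US_ARMY_AGE_RANGE = {
--     "17-22": (42, 71),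
--     "22-26": (40, 75),
--     "27-31": (39, 77),
--     "32-36": (36, 75),
--     "37-41": (34, 73),
--     "42-46": (31, 66),
--     "47-51": (25, 59),
--     "52-56": (20, 56),
--     "57-61": (18, 54),
--     "62+": (16, 50),
-- }
--
-- def get_army_pushup_range(age: int) -> Tuple[int, int]:
--     """U.S. Army Standards, push-ups are performed within a two-minute period"""
--
--     if age < 17:
--         raise ValueError("Age must be at least 17")
--
--     result = next(
--         (
--             US_ARMY_AGE_RANGE[age_group]
--             for min_age, max_age, age_group in AGE_GROUPS_ARMY
--             if min_age <= age <= max_age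
--         ),
--         None,
--     )
--     if result is None:
--         raise ValueError(f"No pushup range found for age {age}")
--     return result
-- ===== SOURCE B (Python) =====
-- # Closed-form arithmetic bracket index instead of scanning the bracket table.
-- RANGES = [(42, 71), (40, 75), (39, 77), (36, 75), (34, 73),
--           (31, 66), (25, 59), (20, 56), (18, 54), (16, 50)]
--
--
-- def get_army_pushup_range(age: int):
--     if age < 17:
--         raise ValueError("Age must be at least 17")
--     if age <= 22:
--         return RANGES[0]
--     return RANGES[min(9, (age - 22) // 5 + 1)]
-- ===== Notes on version B (the rewrite author's own statement) =====
-- stated objective: simpler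
-- what changed: Replaces the linear scan over the bracket table plus dict lookup by a direct closed-form arithmetic index ((age-22)//5+1, clamped) into a single ranges list.
import Mathlib
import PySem

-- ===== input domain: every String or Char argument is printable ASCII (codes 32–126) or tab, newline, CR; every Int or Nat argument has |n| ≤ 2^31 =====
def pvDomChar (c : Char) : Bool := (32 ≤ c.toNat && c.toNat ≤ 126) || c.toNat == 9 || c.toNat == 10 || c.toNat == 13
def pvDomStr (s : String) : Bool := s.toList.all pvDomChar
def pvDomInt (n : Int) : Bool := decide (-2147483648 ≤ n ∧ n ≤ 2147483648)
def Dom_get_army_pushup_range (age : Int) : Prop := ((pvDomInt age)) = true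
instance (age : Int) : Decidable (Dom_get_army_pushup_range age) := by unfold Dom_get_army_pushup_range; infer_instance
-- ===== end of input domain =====

-- B replaces A's linear scan of the bracket table + dict lookup by a closed-form
-- arithmetic bracket index into a single ranges list (objective: simpler).

-- ===== PORT A =====
-- float('inf') upper bound of the last bracket ported as `none` (exact: it only ever
-- makes the `age <= max_age` test true).
def pvAgeGroupsArmy : List (Int × Option Int × String) :=
  [(17, some 22, "17-22"), (23, some 26, "22-26"), (27, some 31, "27-31"),
   (32, some 36, "32-36"), (37, some 41, "37-41"), (42, some 46, "42-46"),
   (47, some 51, "47-51"), (52, some 56, "52-56"), (57, some 61, "57-61"),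
   (62, none, "62+")]

def pvUsArmyAgeRange : PySem.Dict String (Int × Int) :=
  PySem.Dict.ofList
    [("17-22", (42, 71)), ("22-26", (40, 75)), ("27-31", (39, 77)),
     ("32-36", (36, 75)), ("37-41", (34, 73)), ("42-46", (31, 66)),
     ("47-51", (25, 59)), ("52-56", (20, 56)), ("57-61", (18, 54)),
     ("62+", (16, 50))]

-- age < 17 raises ValueError (excluded by Pre_); the `none` branch of `next` raises
-- ValueError "No pushup range found" — both unreachable under Pre_, dummy (0,0).
def get_army_pushup_range (age : Int) : Int × Int :=
  match pvAgeGroupsArmy.find?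
      (fun g => decide (g.1 ≤ age) &&
        (match g.2.1 with | none => true | some mx => decide (age ≤ mx))) with
  | some g => (pvUsArmyAgeRange.get? g.2.2).getD (0, 0)
  | none => (0, 0)

-- ===== PORT B =====
def pvRanges : List (Int × Int) :=
  [(42, 71), (40, 75), (39, 77), (36, 75), (34, 73),
   (31, 66), (25, 59), (20, 56), (18, 54), (16, 50)]

-- age < 17 raises ValueError (excluded by Pre_); list indexing via pyGet?, in-range
-- by construction, dummy (0,0) never reached.
def get_army_pushup_range_alt (age : Int) : Int × Int :=
  if age ≤ 22 then (PySem.List.pyGet? pvRanges 0).getD (0, 0)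
  else (PySem.List.pyGet? pvRanges (min 9 (PySem.Int.floordiv (age - 22) 5 + 1))).getD (0, 0)

-- ===== PRECONDITION & SPEC =====
-- A raises ValueError exactly on age < 17 (integer ages ≥ 17 always hit a bracket).
def Pre_get_army_pushup_range (age : Int) : Prop := 17 ≤ age
instance (age : Int) : Decidable (Pre_get_army_pushup_range age) := by
  unfold Pre_get_army_pushup_range; infer_instance
def pvWitness_get_army_pushup_range : Int := 30

def Spec_get_army_pushup_range (age : Int) (out : Int × Int) : Prop := out = get_army_pushup_range_alt age
instance (age : Int) (out : Int × Int) : Decidable (Spec_get_army_pushup_range age out) := by unfold Spec_get_army_pushup_range; infer_instance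

-- ===== CLAIM (what is proved, stated in full; the proofs are below) =====
def Claim_equal_get_army_pushup_range : Prop := ∀ (age : Int), Dom_get_army_pushup_range age → Pre_get_army_pushup_range age → Spec_get_army_pushup_range age (get_army_pushup_range age)

-- ===== LEMMAS AND PROOFS =====
theorem pv_equal_high (age : Int) (h : 62 ≤ age) :
    get_army_pushup_range age = get_army_pushup_range_alt age := by
  have h17 : (17:Int) ≤ age := by omega
  have h62 : (62:Int) ≤ age := h
  have n22 : ¬ age ≤ (22:Int) := by omega
  have n26 : ¬ age ≤ (26:Int) := by omega
  have n31 : ¬ age ≤ (31:Int) := by omega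
  have n36 : ¬ age ≤ (36:Int) := by omega
  have n41 : ¬ age ≤ (41:Int) := by omega
  have n46 : ¬ age ≤ (46:Int) := by omega
  have n51 : ¬ age ≤ (51:Int) := by omega
  have n56 : ¬ age ≤ (56:Int) := by omega
  have n61 : ¬ age ≤ (61:Int) := by omega
  have hidx : min 9 (PySem.Int.floordiv (age - 22) 5 + 1) = 9 := by
    have h8 : (8:Int) ≤ PySem.Int.floordiv (age - 22) 5 := by
      rw [PySem.Int.le_floordiv_iff_mul_le (by omega)]; omega
    omega
  unfold get_army_pushup_range get_army_pushup_range_alt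
  rw [hidx]
  simp [pvAgeGroupsArmy, List.find?, h17, h62, n22, n26, n31, n36, n41, n46, n51, n56, n61]
  decide

-- ===== VERDICT (by name: the statement is the Claim_ definition above) =====
theorem get_army_pushup_range_spec : Claim_equal_get_army_pushup_range := by
  intro age _ hpre
  unfold Spec_get_army_pushup_range
  by_cases h : age ≤ 61
  · have h17 : (17:Int) ≤ age := hpre
    interval_cases age <;> decide
  · exact pv_equal_high age (by omega)
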